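-- pv_equiv track=rewrite | github.com/bar-ang/ProjectEulerSolutions | oldfiles/old_pebonus1.py | non_divisible_binomials
-- ===== SOURCE A (Python) =====
-- def non_divisible_binomials(n, p):
--     """
--     for integer n and prime p,
--     this function returns all k such that:
--     p does NOT divide (n choose k)
--
--     (The function relies on Lucas's theorm)
--     """
--     if n == 0:
--         return [0]
--     inner = non_divisible_binomials(n // p, p)
--     res = []
--     for i in range((n % p) + 1):
--         for x in inner:
--             res.append(x*p + i)
--
--     return res
-- ===== SOURCE B (Python) =====
-- def non_divisible_binomials(n, p):
--     """
--     for integer n and prime p,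
--     this function returns all k such that:
--     p does NOT divide (n choose k)
--
--     (By Lucas: iterate over the base-p digits of n, most significant first.)
--     """
--     digits = []
--     m = n
--     while m > 0:
--         digits.append(m % p)
--         m //= p
--     res = [0]
--     for d in reversed(digits):
--         res = [x * p + i for i in range(d + 1) for x in res]
--     return res
-- ===== Notes on version B (the rewrite author's own statement) =====
-- stated objective: alternative
-- what changed: Replaces A's recursion over n//p with an explicit loop that first extracts the base-p digits of n and then folds them most-significant-first, building the result iteratively.
-- outside the precondition, e.g. on non_divisible_binomials(-2, -2): A returns [], B returns [0]
import Mathlib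
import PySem

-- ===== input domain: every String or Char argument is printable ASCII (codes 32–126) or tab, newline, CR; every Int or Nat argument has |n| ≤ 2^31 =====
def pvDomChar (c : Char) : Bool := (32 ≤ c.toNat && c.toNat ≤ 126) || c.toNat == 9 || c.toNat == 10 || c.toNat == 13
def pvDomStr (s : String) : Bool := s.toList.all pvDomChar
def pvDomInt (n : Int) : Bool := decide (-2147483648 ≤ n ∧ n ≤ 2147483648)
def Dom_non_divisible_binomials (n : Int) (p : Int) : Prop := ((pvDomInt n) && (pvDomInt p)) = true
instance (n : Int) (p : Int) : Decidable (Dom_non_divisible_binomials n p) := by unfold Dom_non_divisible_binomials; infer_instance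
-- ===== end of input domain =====

-- B replaces A's recursion over n//p with an explicit base-p digit extraction followed by an
-- MSB-first fold over the digit list (same combination order, no recursion): objective 'alternative'.
-- Both recursions are encoded with a fuel parameter n.toNat + 1, which never runs out on Pre_
-- (n strictly decreases under n // p when 0 < n and 2 ≤ p); it is a totality encoding, not a guard.

-- ===== PORT A =====
def pvLoopA (fuel : Nat) (n : Int) (p : Int) : List Int :=
  match fuel with
  | 0 => []  -- unreachable on Pre_ (in Python the recursion never reaches the base case off Pre_)
  | fuel + 1 =>
    if n = 0 then [0]
    else
      let inner := pvLoopA fuel (PySem.Int.floordiv n p) p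
      (PySem.List.pyRange 0 (PySem.Int.mod n p + 1) 1).foldl
        (fun res i => inner.foldl (fun r x => r ++ [x * p + i]) res) []

def non_divisible_binomials (n : Int) (p : Int) : List Int :=
  pvLoopA (n.toNat + 1) n p

-- ===== PORT B =====
-- the while-loop collecting base-p digits of n (LSB first), same fuel encoding
def pvDigits (fuel : Nat) (m : Int) (p : Int) : List Int :=
  match fuel with
  | 0 => []  -- unreachable on Pre_
  | fuel + 1 =>
    if 0 < m then PySem.Int.mod m p :: pvDigits fuel (PySem.Int.floordiv m p) p
    else []

def non_divisible_binomials_alt (n : Int) (p : Int) : List Int :=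
  (pvDigits (n.toNat + 1) n p).reverse.foldl
    (fun res d =>
      (PySem.List.pyRange 0 (d + 1) 1).foldl
        (fun acc i => acc ++ res.map (fun x => x * p + i)) [])
    [0]

-- ===== PRECONDITION & SPEC =====
-- Pre_ restricts to the function's natural domain (Lucas's theorem: n = 0, or 0 < n with a prime
-- modulus, hence 2 ≤ p): outside it A either raises (RecursionError for 0 < n with p ∈ {0,1}, or for
-- negative n with 2 ≤ p) or returns accidental values of floor-division sign behaviour (e.g. [] for
-- negative n with negative p) that neither program is meant to specify.
def Pre_non_divisible_binomials (n : Int) (p : Int) : Prop := n = 0 ∨ (0 < n ∧ 2 ≤ p)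
instance (n : Int) (p : Int) : Decidable (Pre_non_divisible_binomials n p) := by
  unfold Pre_non_divisible_binomials; infer_instance
def pvWitness_non_divisible_binomials : Int × Int := (6, 2)

def Spec_non_divisible_binomials (n : Int) (p : Int) (out : List Int) : Prop := out = non_divisible_binomials_alt n p
instance (n : Int) (p : Int) (out : List Int) : Decidable (Spec_non_divisible_binomials n p out) := by unfold Spec_non_divisible_binomials; infer_instance

-- ===== CLAIM (what is proved, stated in full; the proofs are below) =====
def Claim_equal_non_divisible_binomials : Prop := ∀ (n : Int) (p : Int), Dom_non_divisible_binomials n p → Pre_non_divisible_binomials n p → Spec_non_divisible_binomials n p (non_divisible_binomials n p)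

-- ===== LEMMAS AND PROOFS =====

theorem pvFloordiv_toNat_lt (n p : Int) (hn : 0 < n) (hp : 2 ≤ p) :
    (PySem.Int.floordiv n p).toNat < n.toNat := by
  have h1 : PySem.Int.floordiv n p < n := by
    rw [PySem.Int.floordiv_lt_iff_lt_mul (by omega : (0:Int) < p)]
    nlinarith
  have h2 : 0 ≤ PySem.Int.floordiv n p := by
    rw [PySem.Int.floordiv_eq_ediv_of_pos (by omega)]
    exact Int.ediv_nonneg (by omega) (by omega)
  omega

-- one step of B's fold, as a function
def pvStep (p : Int) (res : List Int) (d : Int) : List Int :=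
  (PySem.List.pyRange 0 (d + 1) 1).foldl
    (fun acc i => acc ++ res.map (fun x => x * p + i)) []

-- A's nested append loop is one pvStep applied to the inner result
theorem pvA_step_eq_pvStep (p : Int) (inner : List Int) (m : Int) :
    (PySem.List.pyRange 0 m 1).foldl
        (fun res i => inner.foldl (fun r x => r ++ [x * p + i]) res) []
      = (PySem.List.pyRange 0 m 1).foldl
        (fun acc i => acc ++ inner.map (fun x => x * p + i)) [] := by
  apply PySem.List.foldl_congr_mem
  intro res i _
  exact PySem.List.foldl_append_singleton_eq_map _ _ _

-- with enough fuel, A's recursion computes B's MSB-first fold over the digit list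
theorem pvMain (fuel : Nat) (p : Int) (hp : 2 ≤ p) :
    ∀ n : Int, 0 ≤ n → n.toNat < fuel →
      pvLoopA fuel n p = (pvDigits fuel n p).reverse.foldl (pvStep p) [0] := by
  induction fuel with
  | zero => intro n _ h; omega
  | succ fuel ih =>
    intro n hn hfuel
    by_cases h0 : n = 0
    · subst h0; simp [pvLoopA, pvDigits]
    · have hpos : 0 < n := by omega
      have hdec := pvFloordiv_toNat_lt n p hpos hp
      have hq0 : 0 ≤ PySem.Int.floordiv n p := by
        rw [PySem.Int.floordiv_eq_ediv_of_pos (by omega)]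
        exact Int.ediv_nonneg (by omega) (by omega)
      rw [pvLoopA, pvDigits]
      simp only [h0, if_false, hpos, if_true]
      rw [pvA_step_eq_pvStep, List.reverse_cons, List.foldl_append,
          ih (PySem.Int.floordiv n p) hq0 (by omega)]
      rfl

-- ===== VERDICT (by name: the statement is the Claim_ definition above) =====
theorem non_divisible_binomials_spec : Claim_equal_non_divisible_binomials := by
  intro n p _ hpre
  unfold Spec_non_divisible_binomials non_divisible_binomials non_divisible_binomials_alt
  rcases hpre with h0 | ⟨hn, hp⟩
  · subst h0; simp [pvLoopA, pvDigits]
  · exact pvMain (n.toNat + 1) p hp n (by omega) (by omega)
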